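-- pv_equiv track=rewrite | github.com/rayz1065/competitive-programming | advent_of_code/2024/day_05/main.py | part_2
-- ===== SOURCE A (Python) =====
-- from itertools import combinations
--
-- def check_manual(graph, manual):
--     return all(a not in graph[b] for a, b in combinations(manual, r=2))
--
-- def _make_topo(graph, a, topo, visited):
--     if a in visited:
--         return
--     visited.add(a)
--
--     for b in graph[a]:
--         _make_topo(graph, b, topo, visited)
--
--     topo.append(a)
--
-- def make_topo(graph):
--     visited = set()
--     res = []
--     for v in graph.keys():
--         _make_topo(graph, v, res, visited)
--     return res
--
-- def project_graph(graph, vertices):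
--     vertices = set(vertices)
--     graph = dict(
--         (a, set(x for x in b if x in vertices))
--         for a, b in graph.items()
--         if a in vertices
--     )
--     return graph
--
-- def part_2(graph, manuals):
--     manuals = [x for x in manuals if not check_manual(graph, x)]
--
--     res = 0
--     for manual in manuals:
--         graph_manual = project_graph(graph, manual)
--         topo = make_topo(graph_manual)
--         ordering = {x: i for i, x in enumerate(topo)}
--         manual = sorted(manual, key=lambda x: -ordering[x])
--         res += manual[len(manual) // 2]
--
--     return res
-- ===== SOURCE B (Python) =====
-- from itertools import combinations
--
--
-- def part_2(graph, manuals):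
--     # For a misordered manual, the page that belongs in the middle is the unique
--     # page with exactly len(manual) // 2 predecessors among the manual's pages
--     # (the rules restricted to a manual order it totally), so no projected graph,
--     # topological sort or full reordering is needed.
--     def in_order(manual):
--         return all(a not in graph[b] for a, b in combinations(manual, r=2))
--
--     def rank(manual, x):
--         return sum(x in graph[y] for y in manual)
--
--     res = 0
--     for manual in manuals:
--         if in_order(manual):
--             continue
--         res += next(x for x in manual if rank(manual, x) == len(manual) // 2)
--     return res
-- ===== Notes on version B (the rewrite author's own statement) =====
-- stated objective: simpler
-- what changed: Instead of projecting the graph, running a recursive DFS topological sort, building an ordering dict and comparator-sorting each misordered manual, B keeps A's pairwise order check but picks the middle page directly as the unique page with exactly len(manual)//2 predecessors among the manual's pages.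
-- outside the precondition, e.g. on part_2({1: [2], 2: [1]}, [[1, 2]]): A returns 2, B returns 1; on part_2({1: [2], 2: [3], 3: [1]}, [[1, 2, 3]]): A returns 2, B returns 1
import Mathlib
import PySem

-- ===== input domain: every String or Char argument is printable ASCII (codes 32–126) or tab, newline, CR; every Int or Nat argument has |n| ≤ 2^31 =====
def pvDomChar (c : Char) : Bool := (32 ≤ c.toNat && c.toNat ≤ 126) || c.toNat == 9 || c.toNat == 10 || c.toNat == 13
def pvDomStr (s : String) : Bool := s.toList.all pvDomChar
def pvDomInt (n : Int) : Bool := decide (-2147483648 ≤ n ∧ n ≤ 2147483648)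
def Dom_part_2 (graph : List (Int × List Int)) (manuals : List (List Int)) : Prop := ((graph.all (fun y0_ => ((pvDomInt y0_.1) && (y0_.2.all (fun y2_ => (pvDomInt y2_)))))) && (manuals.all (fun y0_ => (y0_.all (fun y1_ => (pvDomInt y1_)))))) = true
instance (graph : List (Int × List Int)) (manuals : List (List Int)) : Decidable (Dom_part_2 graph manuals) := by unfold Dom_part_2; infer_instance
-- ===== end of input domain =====

-- B replaces A's project-graph / recursive-DFS-topological-sort / ordering-dict / comparator-sort
-- pipeline by picking the middle page of each misordered manual directly: it is the unique page
-- with exactly len(manual)//2 predecessors among the manual's pages (objective: simpler).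

-- ===== PORT A =====

-- hand port of itertools.combinations(l, r=2): all pairs (l[i], l[j]) with i < j, in that order (exact)
def pvCombs2 (l : List Int) : List (Int × Int) :=
  match l with
  | [] => []
  | x :: xs => xs.map (fun y => (x, y)) ++ pvCombs2 xs

-- graph[b] raises KeyError when b is not a key: Pre_part_2 requires every manual page to be a key,
-- so the total form getD is exact there
def pvCheck (g : PySem.Dict Int (List Int)) (manual : List Int) : Bool :=
  (pvCombs2 manual).all (fun ab => !((g.getD ab.2 []).contains ab.1))

-- dict((a, set(...)) for a, b in graph.items() if a in vertices)
def pvProject (g : PySem.Dict Int (List Int)) (vertices : List Int) : PySem.Dict Int (List Int) :=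
  let vs : PySem.Set Int := PySem.Set.ofList vertices
  ((g.items.filter (fun p => vs.contains p.1)).map
      (fun p => (p.1, (PySem.Set.ofList (p.2.filter (fun x => vs.contains x)) : List Int)))).foldl
    (fun d p => d.insert p.1 p.2) PySem.Dict.empty

-- _make_topo: recursive DFS; fuel only guards termination (size+1 per root call never runs out,
-- since every non-trivial nested call has first marked a fresh vertex visited)
def pvMkTopo (g : PySem.Dict Int (List Int)) : Nat → Int → List Int × PySem.Set Int → List Int × PySem.Set Int
  | 0, _, st => st
  | fuel+1, a, st =>
    if PySem.Set.contains st.2 a then st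
    else
      let st1 := (st.1, PySem.Set.add st.2 a)
      let st2 := (g.getD a []).foldl (fun s b => pvMkTopo g fuel b s) st1
      (st2.1 ++ [a], st2.2)

def pvMakeTopo (g : PySem.Dict Int (List Int)) : List Int :=
  (g.keys.foldl (fun st v => pvMkTopo g (g.size + 1) v st) ([], PySem.Set.empty)).1

def part_2 (graph : List (Int × List Int)) (manuals : List (List Int)) : Int :=
  let g : PySem.Dict Int (List Int) := PySem.Dict.mk graph
  let bad := manuals.filter (fun x => !pvCheck g x)
  bad.foldl (fun res manual =>
    let gm := pvProject g manual
    let topo := pvMakeTopo gm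
    let ordering : PySem.Dict Int Int :=
      (PySem.List.enumerate topo 0).foldl (fun d p => d.insert p.2 (p.1 : Int)) PySem.Dict.empty
    let manual2 := PySem.List.sorted manual (fun x => -(ordering.getD x 0)) false
    res + PySem.List.pyGetD manual2 ((manual2.length / 2 : Nat) : Int) 0) 0

-- ===== PORT B =====

-- in_order(manual): the same pairwise scan as A's check_manual (kept as-is, per the task);
-- graph[b] raises KeyError where b is not a key, exactly as in A
def pvOrderedOk (g : PySem.Dict Int (List Int)) (manual : List Int) : Bool :=
  (pvCombs2 manual).all (fun ab => !((g.getD ab.2 []).contains ab.1))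

-- sum(x in graph[y] for y in manual); for a misordered manual Pre_part_2 makes every page a key
def pvRank (g : PySem.Dict Int (List Int)) (manual : List Int) (x : Int) : Int :=
  manual.foldl (fun acc y => acc + (if (g.getD y []).contains x then 1 else 0)) 0

-- next(...) raises StopIteration when no page has the middle rank; Pre_part_2 guarantees one exists,
-- so the total form (find? ...).getD 0 is exact there
def part_2_alt (graph : List (Int × List Int)) (manuals : List (List Int)) : Int :=
  let g : PySem.Dict Int (List Int) := PySem.Dict.mk graph
  manuals.foldl (fun res manual =>
    if pvOrderedOk g manual then res
    else res + (manual.find? (fun x => pvRank g manual x == ((manual.length / 2 : Nat) : Int))).getD 0) 0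

-- ===== PRECONDITION & SPEC =====

-- pvEdge graph x y = (y in graph[x]): page x must be printed before page y
def pvEdge (graph : List (Int × List Int)) (x y : Int) : Bool :=
  ((PySem.Dict.mk graph).getD x []).contains y

-- Pre_ excludes: duplicate dict keys (Python keeps the last value, the assoc-list port the first);
-- manuals whose non-leading pages are not all graph keys (A's pairwise check raises KeyError);
-- and misordered manuals (ones with an inverted pair, which get reordered) whose pages are not
-- strictly totally ordered by the rules (a duplicate/non-key page, a missing/cyclic/non-transitive
-- rule pair) — there A raises KeyError or its value is an accidental artefact of CPython's
-- hash-based set iteration order.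
def Pre_part_2 (graph : List (Int × List Int)) (manuals : List (List Int)) : Prop :=
  (graph.map Prod.fst).Nodup ∧
  ∀ m ∈ manuals,
    (∀ x ∈ m.drop 1, x ∈ graph.map Prod.fst) ∧
    (¬ m.Pairwise (fun a b => pvEdge graph b a = false) →
    (m.Nodup
      ∧ (∀ x ∈ m, x ∈ graph.map Prod.fst)
      ∧ (∀ x ∈ m, pvEdge graph x x = false)
      ∧ (∀ x ∈ m, ∀ y ∈ m, x ≠ y → pvEdge graph x y = !pvEdge graph y x)
      ∧ (∀ x ∈ m, ∀ y ∈ m, ∀ z ∈ m, pvEdge graph x y = true → pvEdge graph y z = true → pvEdge graph x z = true)))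

instance (graph : List (Int × List Int)) (manuals : List (List Int)) : Decidable (Pre_part_2 graph manuals) := by
  unfold Pre_part_2; infer_instance

def pvWitness_part_2 : (List (Int × List Int)) × List (List Int) := ([(1, [2]), (2, [])], [[2, 1]])

def Spec_part_2 (graph : List (Int × List Int)) (manuals : List (List Int)) (out : Int) : Prop := out = part_2_alt graph manuals
instance (graph : List (Int × List Int)) (manuals : List (List Int)) (out : Int) : Decidable (Spec_part_2 graph manuals out) := by unfold Spec_part_2; infer_instance

-- ===== CLAIM (what is proved, stated in full; the proofs are below) =====
def Claim_equal_part_2 : Prop := ∀ (graph : List (Int × List Int)) (manuals : List (List Int)), Dom_part_2 graph manuals → Pre_part_2 graph manuals → Spec_part_2 graph manuals (part_2 graph manuals)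

-- ===== LEMMAS AND PROOFS =====

-- strict total order (as Bool relation) on the elements of m
def pvSTO (R : Int → Int → Bool) (m : List Int) : Prop :=
  (∀ x ∈ m, R x x = false) ∧
  (∀ x ∈ m, ∀ y ∈ m, x ≠ y → R x y = !R y x) ∧
  (∀ x ∈ m, ∀ y ∈ m, ∀ z ∈ m, R x y = true → R y z = true → R x z = true)

-- DFS invariant: topo is a duplicate-free, descending (later pages first), successor-closed list over m
def pvInv (R : Int → Int → Bool) (m topo : List Int) : Prop :=
  topo.Nodup ∧ (∀ x ∈ topo, x ∈ m) ∧ topo.Pairwise (fun u v => R v u = true) ∧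
  (∀ x ∈ topo, ∀ y ∈ m, R x y = true → y ∈ topo)

-- adjacency of the projected graph: exactly the R-successors inside m
def pvAdjOk (g : PySem.Dict Int (List Int)) (R : Int → Int → Bool) (m : List Int) : Prop :=
  ∀ a ∈ m, ∀ y, (y ∈ g.getD a []) ↔ (y ∈ m ∧ R a y = true)


lemma pvSet_contains_iff (s : PySem.Set Int) (x : Int) : PySem.Set.contains s x = true ↔ x ∈ s := by
  simp [PySem.Set.contains]

lemma pvSet_contains_eq (s : PySem.Set Int) (x : Int) : PySem.Set.contains s x = decide (x ∈ s) := by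
  simp [PySem.Set.contains]

lemma pvRank_foldl_aux (g : PySem.Dict Int (List Int)) (x : Int) :
    ∀ (l : List Int) (a : Int),
      l.foldl (fun acc y => acc + (if (g.getD y []).contains x then 1 else 0)) a
        = a + (l.countP (fun y => (g.getD y []).contains x) : Int) := by
  intro l
  induction l with
  | nil => intro a; simp
  | cons y t ih =>
    intro a
    simp only [List.foldl_cons, List.countP_cons, ih]
    by_cases h : (g.getD y []).contains x = true <;> simp [h] <;> push_cast <;> ring

lemma pvCountP_of_decide_lt {α : Type} (p : α → Bool) :
    ∀ (L : List α) (i : Nat), i ≤ L.length →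
      (∀ j (hj : j < L.length), p L[j] = decide (j < i)) → L.countP p = i := by
  intro L
  induction L with
  | nil => intro i hi _; simp only [List.countP_nil]; simp at hi; omega
  | cons x t ih =>
    intro i hi h
    match i with
    | 0 =>
      have hx : p x = false := by simpa using h 0 (by simp)
      have ht : t.countP p = 0 := by
        apply ih 0 (by omega)
        intro j hj
        simpa using h (j+1) (by simpa using Nat.succ_lt_succ hj)
      simp [List.countP_cons, hx, ht]
    | k+1 =>
      have hx : p x = true := by simpa using h 0 (by simp)
      have ht : t.countP p = k := by
        apply ih k (by simpa using hi)
        intro j hj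
        have := h (j+1) (by simpa using Nat.succ_lt_succ hj)
        simpa [Nat.succ_lt_succ_iff] using this
      simp [List.countP_cons, hx, ht]

lemma pvCountP_orb (q : Int → Bool) :
    ∀ (m : List Int) (x : Int), x ∈ m → m.Nodup → q x = false →
      m.countP (fun p => q p || p == x) = m.countP q + 1 := by
  intro m
  induction m with
  | nil => intro x hx; simp at hx
  | cons y t ih =>
    intro x hx hnd hqx
    rcases List.mem_cons.mp hx with h | h
    · subst h
      have hxt : x ∉ t := (List.nodup_cons.mp hnd).1
      have : t.countP (fun p => q p || p == x) = t.countP q := by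
        apply List.countP_congr
        intro z hz
        have : z ≠ x := fun he => hxt (he ▸ hz)
        simp [this]
      simp [List.countP_cons, hqx, this]
    · have hyx : y ≠ x := by
        rintro rfl; exact (List.nodup_cons.mp hnd).1 h
      have := ih x h (List.nodup_cons.mp hnd).2 hqx
      by_cases hy : q y = true <;>
        simp [List.countP_cons, hy, hyx, this] <;> omega

lemma pvCombs2_all (q : Int × Int → Bool) :
    ∀ (l : List Int), ((pvCombs2 l).all q = true ↔ l.Pairwise (fun a b => q (a, b) = true)) := by
  intro l
  induction l with
  | nil => simp [pvCombs2]
  | cons x t ih =>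
    simp [pvCombs2, List.pairwise_cons, ih, and_comm]

lemma pvRank_eq_countP (g : PySem.Dict Int (List Int)) (manual : List Int) (x : Int) :
    pvRank g manual x = (manual.countP (fun y => (g.getD y []).contains x) : Int) := by
  have h := pvRank_foldl_aux g x manual 0
  simp only [pvRank]
  rw [h]
  simp

lemma pvMkTopo_spec (g : PySem.Dict Int (List Int)) (R : Int → Int → Bool) (m : List Int)
    (hsto : pvSTO R m) (hadj : pvAdjOk g R m) (hnd : m.Nodup) :
    ∀ (fuel : Nat) (a : Int) (topo : List Int) (visited : PySem.Set Int) (P : Int → Prop),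
    a ∈ m →
    pvInv R m topo →
    (∀ x, PySem.Set.contains visited x = true ↔ (x ∈ topo ∨ P x)) →
    (∀ p, P p → p ∈ m ∧ R p a = true) →
    m.countP (fun x => !PySem.Set.contains visited x) < fuel →
    pvInv R m (pvMkTopo g fuel a (topo, visited)).1 ∧
    (∃ ext, (pvMkTopo g fuel a (topo, visited)).1 = topo ++ ext) ∧
    (∀ x, x ∈ (pvMkTopo g fuel a (topo, visited)).1 ↔ (x ∈ topo ∨ (x ∈ m ∧ (x = a ∨ R a x = true)))) ∧
    (∀ x, PySem.Set.contains (pvMkTopo g fuel a (topo, visited)).2 x = true ↔ (x ∈ (pvMkTopo g fuel a (topo, visited)).1 ∨ P x)) := by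
  intro fuel
  induction fuel with
  | zero => intro a topo visited P _ _ _ _ hcnt; omega
  | succ f IH =>
    intro a topo visited P ha hinv hvis hP hcnt
    obtain ⟨hirr, htot, htr⟩ := hsto
    by_cases hca : PySem.Set.contains visited a = true
    · have ham : a ∈ visited := (pvSet_contains_iff _ _).mp hca
      have hres : pvMkTopo g (f+1) a (topo, visited) = (topo, visited) := by
        simp [pvMkTopo, ham]
      rw [hres]
      have hatopo : a ∈ topo := by
        rcases (hvis a).mp hca with h | h
        · exact h
        · exact absurd (hP a h).2 (by simp [hirr a ha])
      refine ⟨hinv, ⟨[], by simp⟩, ?_, hvis⟩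
      intro x
      constructor
      · intro hx; exact Or.inl hx
      · rintro (hx | ⟨hxm, rfl | hR⟩)
        · exact hx
        · exact hatopo
        · exact hinv.2.2.2 a hatopo x hxm hR
    · have hres : pvMkTopo g (f+1) a (topo, visited) =
          (let st2 := (g.getD a []).foldl (fun s b => pvMkTopo g f b s) (topo, PySem.Set.add visited a)
           (st2.1 ++ [a], st2.2)) := by
        have ham : a ∉ visited := fun h => hca ((pvSet_contains_iff _ _).mpr h)
        simp [pvMkTopo, ham]
      rw [hres]
      simp only []
      have hanotopo : a ∉ topo := fun h => hca ((hvis a).mpr (Or.inl h))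
      -- visited.add a
      have hvis1 : ∀ x, PySem.Set.contains (PySem.Set.add visited a) x = true ↔ (x ∈ topo ∨ (P x ∨ x = a)) := by
        intro x
        rw [pvSet_contains_iff, PySem.Set.mem_add]
        rw [← pvSet_contains_iff, hvis]
        tauto
      have hanotvis : a ∉ visited := fun h => hca ((pvSet_contains_iff _ _).mpr h)
      have hcnt1 : m.countP (fun x => !PySem.Set.contains (PySem.Set.add visited a) x) < f := by
        have horb := pvCountP_orb (fun x => !PySem.Set.contains (PySem.Set.add visited a) x) m a ha hnd
          (by simp [pvSet_contains_eq, PySem.Set.mem_add])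
        have hcong : m.countP (fun p => (!PySem.Set.contains (PySem.Set.add visited a) p) || p == a)
            = m.countP (fun x => !PySem.Set.contains visited x) := by
          apply List.countP_congr
          intro z _
          by_cases hz : z = a
          · subst hz; simp [pvSet_contains_eq, PySem.Set.mem_add, hanotvis]
          · simp [pvSet_contains_eq, PySem.Set.mem_add, hz]
        rw [hcong] at horb
        omega
      -- the fold over the children
      have hfold : ∀ (cs : List Int), (∀ b ∈ cs, b ∈ m ∧ R a b = true) →
          ∀ (st : List Int × PySem.Set Int),
          pvInv R m st.1 →
          (∀ x, PySem.Set.contains st.2 x = true ↔ (x ∈ st.1 ∨ (P x ∨ x = a))) →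
          m.countP (fun x => !PySem.Set.contains st.2 x) < f →
          pvInv R m (cs.foldl (fun s b => pvMkTopo g f b s) st).1 ∧
          (∃ ext, (cs.foldl (fun s b => pvMkTopo g f b s) st).1 = st.1 ++ ext) ∧
          (∀ x, x ∈ (cs.foldl (fun s b => pvMkTopo g f b s) st).1 ↔
              (x ∈ st.1 ∨ ∃ b ∈ cs, x ∈ m ∧ (x = b ∨ R b x = true))) ∧
          (∀ x, PySem.Set.contains (cs.foldl (fun s b => pvMkTopo g f b s) st).2 x = true ↔
              (x ∈ (cs.foldl (fun s b => pvMkTopo g f b s) st).1 ∨ (P x ∨ x = a))) ∧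
          m.countP (fun x => !PySem.Set.contains (cs.foldl (fun s b => pvMkTopo g f b s) st).2 x) < f := by
        intro cs
        induction cs with
        | nil =>
          intro _ st h1 h2 h3
          exact ⟨h1, ⟨[], by simp⟩, by simp, h2, h3⟩
        | cons b cbs ihc =>
          intro hbs st h1 h2 h3
          obtain ⟨hbm, hab⟩ := hbs b (by simp)
          have hPb : ∀ p, (P p ∨ p = a) → p ∈ m ∧ R p b = true := by
            rintro p (hp | rfl)
            · obtain ⟨hpm, hpa⟩ := hP p hp
              exact ⟨hpm, htr p hpm a ha b hbm hpa hab⟩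
            · exact ⟨ha, hab⟩
          obtain ⟨k1, ⟨ext1, hext1⟩, k3, k4⟩ :=
            IH b st.1 st.2 (fun x => P x ∨ x = a) hbm h1 h2 hPb h3
          have hgrow : ∀ x, PySem.Set.contains st.2 x = true →
              PySem.Set.contains (pvMkTopo g f b (st.1, st.2)).2 x = true := by
            intro x hx
            rcases (h2 x).mp hx with h | h
            · exact (k4 x).mpr (Or.inl ((k3 x).mpr (Or.inl h)))
            · exact (k4 x).mpr (Or.inr h)
          have hcnt2 : m.countP (fun x => !PySem.Set.contains (pvMkTopo g f b (st.1, st.2)).2 x) < f := by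
            have : m.countP (fun x => !PySem.Set.contains (pvMkTopo g f b (st.1, st.2)).2 x)
                ≤ m.countP (fun x => !PySem.Set.contains st.2 x) := by
              apply List.countP_mono_left
              intro x _ hx
              rw [Bool.not_eq_true'] at hx
              rw [Bool.not_eq_true']
              have he : pvMkTopo g f b st = pvMkTopo g f b (st.1, st.2) := rfl
              rw [he] at hx
              by_cases hc : PySem.Set.contains st.2 x = true
              · rw [hgrow x hc] at hx; cases hx
              · simpa using hc
            omega
          have hstep : (b :: cbs).foldl (fun s b => pvMkTopo g f b s) st
              = cbs.foldl (fun s b => pvMkTopo g f b s) (pvMkTopo g f b st) := by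
            simp
          rw [hstep]
          have hst' : pvMkTopo g f b st = pvMkTopo g f b (st.1, st.2) := by simp
          rw [hst']
          obtain ⟨r1, ⟨ext2, hext2⟩, r3, r4, r5⟩ :=
            ihc (fun c hc => hbs c (by simp [hc])) (pvMkTopo g f b (st.1, st.2)) k1 k4 hcnt2
          refine ⟨r1, ⟨ext1 ++ ext2, by rw [hext2, hext1, List.append_assoc]⟩, ?_, r4, r5⟩
          intro x
          rw [r3, k3]
          constructor
          · rintro ((h | h) | h)
            · exact Or.inl h
            · exact Or.inr ⟨b, by simp, h⟩
            · obtain ⟨c, hc, hx⟩ := h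
              exact Or.inr ⟨c, by simp [hc], hx⟩
          · rintro (h | ⟨c, hc, hx⟩)
            · exact Or.inl (Or.inl h)
            · rcases List.mem_cons.mp hc with rfl | hc
              · exact Or.inl (Or.inr hx)
              · exact Or.inr ⟨c, hc, hx⟩
      -- apply the fold to the real children list
      have hchild : ∀ b ∈ g.getD a [], b ∈ m ∧ R a b = true := by
        intro b hb; exact ((hadj a ha b).mp hb)
      obtain ⟨f1, ⟨ext, hext⟩, f3, f4, _⟩ :=
        hfold (g.getD a []) hchild (topo, PySem.Set.add visited a) hinv hvis1 hcnt1
      set st2 := (g.getD a []).foldl (fun s b => pvMkTopo g f b s) (topo, PySem.Set.add visited a) with hst2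
      -- a is not in st2.1
      have hanotin : a ∉ st2.1 := by
        intro hain
        rcases (f3 a).mp hain with h | ⟨b, hb, _, h⟩
        · exact hanotopo h
        · obtain ⟨hbm, hab⟩ := hchild b hb
          rcases h with rfl | hba
          · exact absurd hab (by simp [hirr a ha])
          · have hne : a ≠ b := by
              rintro rfl; exact absurd hab (by simp [hirr a ha])
            have := htot a ha b hbm hne
            rw [hab, hba] at this
            simp at this
      -- a comes before everything already collected
      have hRa : ∀ u ∈ st2.1, R a u = true := by
        intro u hu
        rcases (f3 u).mp hu with h | ⟨b, hb, hum, h⟩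
        · have hum : u ∈ m := hinv.2.1 u h
          have hne : a ≠ u := fun he => hanotopo (he ▸ h)
          by_cases hua : R u a = true
          · exact absurd (hinv.2.2.2 u h a ha hua) hanotopo
          · have := htot a ha u hum hne
            rw [this]
            simp [hua]
        · obtain ⟨hbm, hab⟩ := hchild b hb
          rcases h with rfl | hbu
          · exact hab
          · exact htr a ha b hbm u hum hab hbu
      obtain ⟨i1, i2, i3, i4⟩ := f1
      refine ⟨⟨?_, ?_, ?_, ?_⟩, ⟨ext ++ [a], by rw [hext, List.append_assoc]⟩, ?_, ?_⟩
      · rw [List.nodup_append]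
        refine ⟨i1, List.nodup_singleton a, ?_⟩
        intro u hu v hv
        rw [List.mem_singleton] at hv
        subst hv
        exact fun he => hanotin (he ▸ hu)
      · intro x hx
        rcases List.mem_append.mp hx with h | h
        · exact i2 x h
        · simp at h; exact h ▸ ha
      · rw [List.pairwise_append]
        refine ⟨i3, by simp, ?_⟩
        intro u hu v hv
        simp at hv
        exact hv ▸ hRa u hu
      · intro x hx y hym hxy
        rcases List.mem_append.mp hx with h | h
        · exact List.mem_append.mpr (Or.inl (i4 x h y hym hxy))
        · simp at h
          subst h
          apply List.mem_append.mpr (Or.inl _)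
          exact (f3 y).mpr (Or.inr ⟨y, (hadj _ ha y).mpr ⟨hym, hxy⟩, hym, Or.inl rfl⟩)
      · intro x
        simp only [List.mem_append, List.mem_singleton]
        rw [f3]
        constructor
        · rintro ((h | ⟨b, hb, hxm, h⟩) | rfl)
          · exact Or.inl h
          · obtain ⟨hbm, hab⟩ := hchild b hb
            rcases h with rfl | hbx
            · exact Or.inr ⟨hxm, Or.inr hab⟩
            · exact Or.inr ⟨hxm, Or.inr (htr a ha b hbm x hxm hab hbx)⟩
          · exact Or.inr ⟨ha, Or.inl rfl⟩
        · rintro (h | ⟨hxm, rfl | hR⟩)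
          · exact Or.inl (Or.inl h)
          · exact Or.inr rfl
          · exact Or.inl (Or.inr ⟨x, (hadj a ha x).mpr ⟨hxm, hR⟩, hxm, Or.inl rfl⟩)
      · intro x
        simp only [List.mem_append, List.mem_singleton]
        rw [f4, f3]
        constructor
        · rintro (h | hp | rfl)
          · exact Or.inl (Or.inl h)
          · exact Or.inr hp
          · exact Or.inl (Or.inr rfl)
        · rintro ((h | rfl) | hp)
          · exact Or.inl h
          · exact Or.inr (Or.inr rfl)
          · exact Or.inr (Or.inl hp)

lemma pvProject_items (graph : List (Int × List Int)) (m : List Int)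
    (hk : (graph.map Prod.fst).Nodup) :
    (pvProject (PySem.Dict.mk graph) m).items =
      (graph.filter (fun p => PySem.Set.contains (PySem.Set.ofList m) p.1)).map
        (fun p => (p.1, (PySem.Set.ofList (p.2.filter (fun x => PySem.Set.contains (PySem.Set.ofList m) x)) : List Int))) := by
  have hitems : (PySem.Dict.mk graph).items = graph := rfl
  unfold pvProject
  simp only [hitems]
  have h := PySem.Dict.items_foldl_insert_fresh
    ((graph.filter (fun p => PySem.Set.contains (PySem.Set.ofList m) p.1)).map
      (fun p => (p.1, (PySem.Set.ofList (p.2.filter (fun x => PySem.Set.contains (PySem.Set.ofList m) x)) : List Int))))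
    Prod.fst Prod.snd PySem.Dict.empty
    (by intro a _; simp [PySem.Dict.contains_empty])
    (by
      have : ((graph.filter (fun p => PySem.Set.contains (PySem.Set.ofList m) p.1)).map
          (fun p => (p.1, (PySem.Set.ofList (p.2.filter (fun x => PySem.Set.contains (PySem.Set.ofList m) x)) : List Int)))).map Prod.fst
          = (graph.filter (fun p => PySem.Set.contains (PySem.Set.ofList m) p.1)).map Prod.fst := by
        simp [List.map_map]
      rw [this]
      exact ((List.filter_sublist).map Prod.fst).nodup hk)
  simpa using h

lemma pvProject_keys_mem (graph : List (Int × List Int)) (m : List Int)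
    (hk : (graph.map Prod.fst).Nodup) (x : Int) :
    x ∈ (pvProject (PySem.Dict.mk graph) m).keys ↔ (x ∈ graph.map Prod.fst ∧ x ∈ m) := by
  simp only [PySem.Dict.keys, pvProject_items graph m hk, List.map_map]
  simp [List.mem_filter, List.mem_map, pvSet_contains_eq, PySem.Set.mem_ofList]

lemma pvProject_keys_nodup (graph : List (Int × List Int)) (m : List Int)
    (hk : (graph.map Prod.fst).Nodup) :
    (pvProject (PySem.Dict.mk graph) m).keys.Nodup := by
  simp only [PySem.Dict.keys, pvProject_items graph m hk]
  have : ((graph.filter (fun p => PySem.Set.contains (PySem.Set.ofList m) p.1)).map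
      (fun p => (p.1, (PySem.Set.ofList (p.2.filter (fun x => PySem.Set.contains (PySem.Set.ofList m) x)) : List Int)))).map Prod.fst
      = (graph.filter (fun p => PySem.Set.contains (PySem.Set.ofList m) p.1)).map Prod.fst := by
    simp [List.map_map]
  rw [show (fun (p : Int × List Int) => p.1) = Prod.fst from rfl, this]
  exact ((List.filter_sublist).map Prod.fst).nodup hk

lemma pvMkGraph_getD (graph : List (Int × List Int)) (hk : (graph.map Prod.fst).Nodup)
    {a : Int} (ha : a ∈ graph.map Prod.fst) :
    ∃ va, (a, va) ∈ graph ∧ (PySem.Dict.mk graph).getD a [] = va := by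
  obtain ⟨⟨a', va⟩, hp, hpa⟩ := List.mem_map.mp ha
  simp only [] at hpa
  subst hpa
  refine ⟨va, hp, ?_⟩
  have hget : (PySem.Dict.mk graph).get? a' = some va := by
    rw [PySem.Dict.get?_eq_some_iff_mem_items _ _ _ hk]
    exact hp
  exact PySem.Dict.getD_of_get?_eq_some _ _ hget

lemma pvProject_adjOk (graph : List (Int × List Int)) (m : List Int)
    (hk : (graph.map Prod.fst).Nodup) (hmk : ∀ x ∈ m, x ∈ graph.map Prod.fst) :
    pvAdjOk (pvProject (PySem.Dict.mk graph) m) (pvEdge graph) m := by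
  intro a ha y
  obtain ⟨va, hva, hgetD⟩ := pvMkGraph_getD graph hk (hmk a ha)
  have hmemproj : (a, (PySem.Set.ofList (va.filter (fun x => PySem.Set.contains (PySem.Set.ofList m) x)) : List Int))
      ∈ (pvProject (PySem.Dict.mk graph) m).items := by
    rw [pvProject_items graph m hk]
    apply List.mem_map.mpr
    refine ⟨(a, va), List.mem_filter.mpr ⟨hva, ?_⟩, rfl⟩
    simp [pvSet_contains_eq, PySem.Set.mem_ofList, ha]
  have hgd := PySem.Dict.getD_of_mem_items _ hmemproj (pvProject_keys_nodup graph m hk) []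
  rw [hgd]
  rw [PySem.Set.mem_ofList]
  simp only [List.mem_filter, pvSet_contains_eq, PySem.Set.mem_ofList]
  unfold pvEdge
  rw [hgetD]
  constructor
  · rintro ⟨h1, h2⟩
    simp at h2
    exact ⟨h2, by simpa using h1⟩
  · rintro ⟨h1, h2⟩
    exact ⟨by simpa using h2, by simpa using h1⟩

lemma pvTopoFold_spec (g : PySem.Dict Int (List Int)) (R : Int → Int → Bool) (m : List Int)
    (hsto : pvSTO R m) (hadj : pvAdjOk g R m) (hnd : m.Nodup) (hms : m.length ≤ g.size) :
    ∀ (ks : List Int), (∀ v ∈ ks, v ∈ m) →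
    ∀ (topo : List Int) (visited : PySem.Set Int),
    pvInv R m topo →
    (∀ x, PySem.Set.contains visited x = true ↔ x ∈ topo) →
    pvInv R m (ks.foldl (fun st v => pvMkTopo g (g.size + 1) v st) (topo, visited)).1 ∧
    (∀ x, x ∈ (ks.foldl (fun st v => pvMkTopo g (g.size + 1) v st) (topo, visited)).1 ↔
        (x ∈ topo ∨ ∃ v ∈ ks, x ∈ m ∧ (x = v ∨ R v x = true))) ∧
    (∀ x, PySem.Set.contains (ks.foldl (fun st v => pvMkTopo g (g.size + 1) v st) (topo, visited)).2 x = true ↔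
        x ∈ (ks.foldl (fun st v => pvMkTopo g (g.size + 1) v st) (topo, visited)).1) := by
  intro ks
  induction ks with
  | nil =>
    intro _ topo visited h1 h2
    exact ⟨h1, by simp, h2⟩
  | cons v vs ih =>
    intro hks topo visited h1 h2
    have hvm : v ∈ m := hks v (by simp)
    have hcnt : m.countP (fun x => !PySem.Set.contains visited x) < g.size + 1 := by
      have := List.countP_le_length (p := fun x => !PySem.Set.contains visited x) (l := m)
      omega
    obtain ⟨k1, ⟨ext1, hext1⟩, k3, k4⟩ :=
      pvMkTopo_spec g R m hsto hadj hnd (g.size + 1) v topo visited (fun _ => False) hvm h1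
        (by intro x; rw [h2]; tauto) (by intro p hp; cases hp) hcnt
    have hstep : (v :: vs).foldl (fun st v => pvMkTopo g (g.size + 1) v st) (topo, visited)
        = vs.foldl (fun st v => pvMkTopo g (g.size + 1) v st) (pvMkTopo g (g.size + 1) v (topo, visited)) := by
      simp
    rw [hstep]
    have hvis' : ∀ x, PySem.Set.contains (pvMkTopo g (g.size + 1) v (topo, visited)).2 x = true ↔
        x ∈ (pvMkTopo g (g.size + 1) v (topo, visited)).1 := by
      intro x; rw [k4]; tauto
    have hmk : pvMkTopo g (g.size + 1) v (topo, visited)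
        = ((pvMkTopo g (g.size + 1) v (topo, visited)).1, (pvMkTopo g (g.size + 1) v (topo, visited)).2) := rfl
    rw [hmk]
    obtain ⟨r1, r2, r3⟩ := ih (fun c hc => hks c (by simp [hc]))
      (pvMkTopo g (g.size + 1) v (topo, visited)).1 (pvMkTopo g (g.size + 1) v (topo, visited)).2 k1 hvis'
    refine ⟨r1, ?_, r3⟩
    intro x
    rw [r2, k3]
    constructor
    · rintro ((h | h) | ⟨c, hc, hx⟩)
      · exact Or.inl h
      · exact Or.inr ⟨v, by simp, h⟩
      · exact Or.inr ⟨c, by simp [hc], hx⟩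
    · rintro (h | ⟨c, hc, hx⟩)
      · exact Or.inl (Or.inl h)
      · rcases List.mem_cons.mp hc with rfl | hc
        · exact Or.inl (Or.inr hx)
        · exact Or.inr ⟨c, hc, hx⟩

lemma pvMakeTopo_spec (graph : List (Int × List Int)) (m : List Int)
    (hk : (graph.map Prod.fst).Nodup) (hnd : m.Nodup)
    (hmk : ∀ x ∈ m, x ∈ graph.map Prod.fst)
    (hirr : ∀ x ∈ m, pvEdge graph x x = false)
    (htot : ∀ x ∈ m, ∀ y ∈ m, x ≠ y → pvEdge graph x y = !pvEdge graph y x)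
    (htr : ∀ x ∈ m, ∀ y ∈ m, ∀ z ∈ m, pvEdge graph x y = true → pvEdge graph y z = true → pvEdge graph x z = true) :
    (pvMakeTopo (pvProject (PySem.Dict.mk graph) m)).Nodup ∧
    (∀ x, x ∈ pvMakeTopo (pvProject (PySem.Dict.mk graph) m) ↔ x ∈ m) ∧
    (pvMakeTopo (pvProject (PySem.Dict.mk graph) m)).Pairwise (fun u v => pvEdge graph v u = true) := by
  set g := pvProject (PySem.Dict.mk graph) m with hg
  have hsto : pvSTO (pvEdge graph) m := ⟨hirr, htot, htr⟩
  have hadj : pvAdjOk g (pvEdge graph) m := pvProject_adjOk graph m hk hmk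
  have hms : m.length ≤ g.size := by
    have hsub : m ⊆ g.keys := by
      intro x hx
      exact (pvProject_keys_mem graph m hk x).mpr ⟨hmk x hx, hx⟩
    have := (hnd.subperm hsub).length_le
    have hsz : g.size = g.keys.length := by simp [PySem.Dict.size, PySem.Dict.keys]
    omega
  have hks : ∀ v ∈ g.keys, v ∈ m := by
    intro v hv
    exact ((pvProject_keys_mem graph m hk v).mp hv).2
  obtain ⟨r1, r2, r3⟩ := pvTopoFold_spec g (pvEdge graph) m hsto hadj hnd hms g.keys hks []
    PySem.Set.empty ⟨by simp, by simp, by simp, by simp⟩ (by intro x; simp [pvSet_contains_eq, PySem.Set.empty])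
  refine ⟨r1.1, ?_, r1.2.2.1⟩
  intro x
  unfold pvMakeTopo
  rw [r2 x]
  constructor
  · rintro (h | ⟨v, hv, hx, _⟩)
    · simp at h
    · exact hx
  · intro hx
    exact Or.inr ⟨x, (pvProject_keys_mem graph m hk x).mpr ⟨hmk x hx, hx⟩, hx, Or.inl rfl⟩

lemma pvOrdering_getD (T : List Int) (hnd : T.Nodup) (i : Nat) (hi : i < T.length) :
    ((PySem.List.enumerate T 0).foldl (fun d p => d.insert p.2 (p.1 : Int)) PySem.Dict.empty).getD T[i] 0
      = (i : Int) := by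
  have hmapk : (PySem.List.enumerate T 0).map (fun p => p.2) = T := PySem.List.map_snd_enumerate T 0
  have hitems := PySem.Dict.items_foldl_insert_fresh (PySem.List.enumerate T 0)
    (fun p => p.2) (fun p => (p.1 : Int)) PySem.Dict.empty
    (by intro a _; simp [PySem.Dict.contains_empty])
    (by rw [hmapk]; exact hnd)
  have hilen : i < (PySem.List.enumerate T 0).length := by
    simpa [PySem.List.length_enumerate] using hi
  have hmem : ((T[i] : Int), (i : Int)) ∈
      ((PySem.List.enumerate T 0).foldl (fun d p => d.insert p.2 (p.1 : Int)) PySem.Dict.empty).items := by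
    rw [hitems]
    show ((T[i] : Int), (i : Int)) ∈ PySem.Dict.empty.items ++ _
    simp only [show (PySem.Dict.empty : PySem.Dict Int Int).items = [] from rfl, List.nil_append]
    apply List.mem_map.mpr
    refine ⟨(PySem.List.enumerate T 0)[i], List.getElem_mem _, ?_⟩
    rw [PySem.List.getElem_enumerate T 0 i hilen]
    simp
  apply PySem.Dict.getD_of_mem_items _ hmem
  show (((PySem.List.enumerate T 0).foldl (fun d p => d.insert p.2 (p.1 : Int)) PySem.Dict.empty).keys).Nodup
  simp only [PySem.Dict.keys, hitems, show (PySem.Dict.empty : PySem.Dict Int Int).items = [] from rfl,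
    List.nil_append, List.map_map]
  have h2 : (List.map ((fun (x : Int × Int) => x.1) ∘ fun (a : Int × Int) => (a.2, a.1)) (PySem.List.enumerate T)) = T := by
    rw [show ((fun (x : Int × Int) => x.1) ∘ fun (a : Int × Int) => (a.2, a.1)) = (fun (a : Int × Int) => a.2) from rfl]
    exact hmapk
  rw [h2]
  exact hnd

lemma pvSorted_eq_rev (m T : List Int) (hndm : m.Nodup) (hndT : T.Nodup)
    (hmem : ∀ x, x ∈ T ↔ x ∈ m) :
    PySem.List.sorted m (fun x =>
      -(((PySem.List.enumerate T 0).foldl (fun d p => d.insert p.2 (p.1 : Int)) PySem.Dict.empty).getD x 0)) false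
      = T.reverse := by
  apply PySem.List.sorted_eq_of_perm_of_pairwise_lt
  · exact (List.perm_ext_iff_of_nodup (List.nodup_reverse.mpr hndT) hndm).mpr (by intro a; rw [List.mem_reverse]; exact hmem a)
  · rw [List.pairwise_reverse]
    rw [List.pairwise_iff_getElem]
    intro i j hi hj hij
    rw [pvOrdering_getD T hndT i hi, pvOrdering_getD T hndT j hj]
    omega

lemma pvRank_at_index (graph : List (Int × List Int)) (m L : List Int)
    (hsto : pvSTO (pvEdge graph) m)
    (hperm : m.Perm L) (hndL : L.Nodup) (hmemL : ∀ x ∈ L, x ∈ m)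
    (hpw : L.Pairwise (fun u v => pvEdge graph u v = true))
    (i : Nat) (hi : i < L.length) :
    m.countP (fun y => pvEdge graph y L[i]) = i := by
  rw [hperm.countP_eq]
  apply pvCountP_of_decide_lt _ L i (by omega)
  intro j hj
  rcases lt_trichotomy j i with h | h | h
  · have := List.pairwise_iff_getElem.mp hpw j i hj hi h
    simp [this, h]
  · subst h
    have := hsto.1 L[j] (hmemL _ (List.getElem_mem _))
    simp [this, lt_irrefl]
  · have hji : pvEdge graph L[i] L[j] = true := List.pairwise_iff_getElem.mp hpw i j hi hj h
    have hne : L[j] ≠ L[i] := by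
      rw [ne_eq, hndL.getElem_inj_iff]
      omega
    have := hsto.2.1 L[j] (hmemL _ (List.getElem_mem _)) L[i] (hmemL _ (List.getElem_mem _)) hne
    rw [hji] at this
    simp only [Bool.not_true] at this
    simp [this]
    omega

lemma pvCheck_iff_pairwise (graph : List (Int × List Int)) (m : List Int) :
    pvCheck (PySem.Dict.mk graph) m = true ↔ m.Pairwise (fun a b => pvEdge graph b a = false) := by
  unfold pvCheck
  rw [pvCombs2_all]
  constructor
  · exact fun h => h.imp (fun hab => by simpa [pvEdge] using hab)
  · exact fun h => h.imp (fun hab => by simpa [pvEdge] using hab)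

lemma pvFind_eq_some {p : Int → Bool} (z : Int) :
    ∀ (l : List Int), z ∈ l → (∀ x ∈ l, p x = true ↔ x = z) → l.find? p = some z := by
  intro l
  induction l with
  | nil => intro h; simp at h
  | cons y t ih =>
    intro hz hall
    by_cases hp : p y = true
    · rw [List.find?_cons_of_pos hp]
      rw [(hall y (by simp)).mp hp]
    · rw [List.find?_cons_of_neg hp]
      have hzt : z ∈ t := by
        rcases List.mem_cons.mp hz with rfl | h
        · exact absurd ((hall z (by simp)).mpr rfl) hp
        · exact h
      exact ih hzt (fun x hx => hall x (by simp [hx]))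

lemma pvStep_eq (graph : List (Int × List Int)) (m : List Int)
    (hk : (graph.map Prod.fst).Nodup) (hndm : m.Nodup)
    (hmkm : ∀ x ∈ m, x ∈ graph.map Prod.fst)
    (hirr : ∀ x ∈ m, pvEdge graph x x = false)
    (htot : ∀ x ∈ m, ∀ y ∈ m, x ≠ y → pvEdge graph x y = !pvEdge graph y x)
    (htr : ∀ x ∈ m, ∀ y ∈ m, ∀ z ∈ m, pvEdge graph x y = true → pvEdge graph y z = true → pvEdge graph x z = true)
    (hbad : pvCheck (PySem.Dict.mk graph) m = false) :
    PySem.List.pyGetD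
      (PySem.List.sorted m (fun x =>
        -(((PySem.List.enumerate (pvMakeTopo (pvProject (PySem.Dict.mk graph) m)) 0).foldl
            (fun d p => d.insert p.2 (p.1 : Int)) PySem.Dict.empty).getD x 0)) false)
      (((PySem.List.sorted m (fun x =>
        -(((PySem.List.enumerate (pvMakeTopo (pvProject (PySem.Dict.mk graph) m)) 0).foldl
            (fun d p => d.insert p.2 (p.1 : Int)) PySem.Dict.empty).getD x 0)) false).length / 2 : Nat) : Int)
      0
      = (m.find? (fun x => pvRank (PySem.Dict.mk graph) m x == ((m.length / 2 : Nat) : Int))).getD 0 := by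
  have hsto : pvSTO (pvEdge graph) m := ⟨hirr, htot, htr⟩
  obtain ⟨hTnd, hTmem, hTpw⟩ := pvMakeTopo_spec graph m hk hndm hmkm hirr htot htr
  set T := pvMakeTopo (pvProject (PySem.Dict.mk graph) m) with hT
  have hsorted := pvSorted_eq_rev m T hndm hTnd hTmem
  rw [hsorted]
  have hperm : m.Perm T.reverse :=
    (List.perm_ext_iff_of_nodup hndm (List.nodup_reverse.mpr hTnd)).mpr
      (by intro a; rw [List.mem_reverse]; exact (hTmem a).symm)
  have hlen : T.reverse.length = m.length := hperm.length_eq.symm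
  have hmne : m ≠ [] := by
    intro he
    rw [he] at hbad
    simp [pvCheck, pvCombs2] at hbad
  have hnpos : 0 < m.length := List.length_pos_iff.mpr hmne
  have hmid : m.length / 2 < T.reverse.length := by omega
  have hLnd : T.reverse.Nodup := List.nodup_reverse.mpr hTnd
  have hLmem : ∀ x ∈ T.reverse, x ∈ m := by
    intro x hx
    exact (hTmem x).mp (List.mem_reverse.mp hx)
  have hLpw : T.reverse.Pairwise (fun u v => pvEdge graph u v = true) :=
    List.pairwise_reverse.mpr hTpw
  -- A's middle element
  have hA : PySem.List.pyGetD T.reverse ((T.reverse.length / 2 : Nat) : Int) 0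
      = T.reverse[m.length / 2]'hmid := by
    rw [PySem.List.pyGetD_natCast]
    rw [hlen]
    exact List.getD_eq_getElem _ _ hmid
  rw [hA]
  -- B finds exactly that element
  have hfind : m.find? (fun x => pvRank (PySem.Dict.mk graph) m x == ((m.length / 2 : Nat) : Int))
      = some (T.reverse[m.length / 2]'hmid) := by
    apply pvFind_eq_some
    · exact hLmem _ (List.getElem_mem _)
    · intro x hx
      obtain ⟨i, hi, hxi⟩ := List.mem_iff_getElem.mp ((List.mem_reverse.mpr ((hTmem x).mpr hx)))
      have hrk := pvRank_at_index graph m T.reverse hsto hperm hLnd hLmem hLpw i hi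
      rw [hxi] at hrk
      rw [pvRank_eq_countP]
      have hpred : (fun y => ((PySem.Dict.mk graph).getD y []).contains x) = (fun y => pvEdge graph y x) := rfl
      rw [hpred]
      constructor
      · intro hbeq
        have hceq : (m.countP fun y => pvEdge graph y x) = m.length / 2 := by
          have h' : ((m.countP fun y => pvEdge graph y x : Nat) : Int) = ((m.length / 2 : Nat) : Int) := by
            simpa using hbeq
          exact_mod_cast h'
        rw [hrk] at hceq
        subst hceq
        exact hxi.symm
      · intro hxeq
        have hieq : i = m.length / 2 := by
          have hgg : T.reverse[i] = T.reverse[m.length / 2]'hmid := by rw [hxi, hxeq]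
          exact (hLnd.getElem_inj_iff).mp hgg
        have hcnt : (m.countP fun y => pvEdge graph y x) = m.length / 2 := by rw [hrk, hieq]
        simp [hcnt]
  rw [hfind]
  rfl

lemma pvFold_eq (graph : List (Int × List Int)) (hk : (graph.map Prod.fst).Nodup) :
    ∀ (manuals : List (List Int)) (res : Int),
    (∀ m ∈ manuals, ¬ m.Pairwise (fun a b => pvEdge graph b a = false) →
        (m.Nodup ∧ (∀ x ∈ m, x ∈ graph.map Prod.fst) ∧ (∀ x ∈ m, pvEdge graph x x = false)

        ∧ (∀ x ∈ m, ∀ y ∈ m, x ≠ y → pvEdge graph x y = !pvEdge graph y x)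
        ∧ (∀ x ∈ m, ∀ y ∈ m, ∀ z ∈ m, pvEdge graph x y = true → pvEdge graph y z = true → pvEdge graph x z = true))) →
    ((manuals.filter (fun x => !pvCheck (PySem.Dict.mk graph) x)).foldl
        (fun res manual =>
          res + PySem.List.pyGetD (PySem.List.sorted manual (fun x => -(((PySem.List.enumerate (pvMakeTopo (pvProject (PySem.Dict.mk graph) manual)) 0).foldl (fun d p => d.insert p.2 (p.1 : Int)) PySem.Dict.empty).getD x 0)) false) (((PySem.List.sorted manual (fun x => -(((PySem.List.enumerate (pvMakeTopo (pvProject (PySem.Dict.mk graph) manual)) 0).foldl (fun d p => d.insert p.2 (p.1 : Int)) PySem.Dict.empty).getD x 0)) false).length / 2 : Nat) : Int) 0) res)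
      = manuals.foldl
        (fun res manual =>
          if pvOrderedOk (PySem.Dict.mk graph) manual then res
          else res + (manual.find? (fun x => pvRank (PySem.Dict.mk graph) manual x == ((manual.length / 2 : Nat) : Int))).getD 0) res := by
  intro manuals
  induction manuals with
  | nil => intro res _; simp
  | cons m ms ih =>
    intro res hprops
    have hok : pvOrderedOk (PySem.Dict.mk graph) m = pvCheck (PySem.Dict.mk graph) m := rfl
    rw [List.filter_cons, List.foldl_cons]
    by_cases hc : pvCheck (PySem.Dict.mk graph) m = true
    · rw [if_neg (by simp [hc]), hok, hc, if_pos rfl]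
      exact ih res (fun c hc => hprops c (by simp [hc]))
    · have hcf : pvCheck (PySem.Dict.mk graph) m = false := by simpa using hc
      obtain ⟨hndm, hmkm, hirr, htot, htr⟩ := hprops m (by simp)
        (fun hpw => hc ((pvCheck_iff_pairwise graph m).mpr hpw))
      rw [if_pos (by simp [hcf]), List.foldl_cons, hok, hcf, if_neg (by simp)]
      rw [pvStep_eq graph m hk hndm hmkm hirr htot htr hcf]
      exact ih _ (fun c hc => hprops c (by simp [hc]))

theorem part_2_spec : Claim_equal_part_2 := by
  intro graph manuals _hdom hpre
  obtain ⟨hk, hms⟩ := hpre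
  unfold Spec_part_2 part_2 part_2_alt
  exact pvFold_eq graph hk manuals 0 (fun m hm => (hms m hm).2)
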